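-- pv_equiv track=rewrite | github.com/dev-prabhat011/bank-statement-extractor | extractor/parsers/kotak.py | _find_col_enhanced
-- ===== SOURCE A (Python) =====
-- from typing import List, Dict, Any, Optional
--
-- def _find_col_enhanced(columns: List, patterns: List[str]) -> Optional[str]:
--     """Enhanced column finder that handles various naming patterns."""
--     for col in columns:
--         col_str = str(col).lower().replace('\n', ' ').replace('\r', ' ').strip()
--
--         # Try exact match first
--         if col_str in patterns:
--             return col
--
--         # Try partial matches
--         for pattern in patterns:
--             if pattern in col_str:
--                 return col
--
--         # Try pattern variations
--         for pattern in patterns: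
--             # Handle split headers like "Withdrawal(Dr)/" + "Deposit(Cr)"
--             if any(part in col_str for part in pattern.split('/')):
--                 return col
--
--     return None
-- ===== SOURCE B (Python) =====
-- def _find_col_enhanced(columns, patterns):
--     """Single-pass column finder: flatten all '/'-split pattern parts into one
--     needle list, then return the first column whose normalized form contains any needle."""
--     needles = []
--     for pattern in patterns:
--         needles.extend(pattern.split('/'))
--     for col in columns:
--         col_str = str(col).lower().replace('\n', ' ').replace('\r', ' ').strip()
--         if any(n in col_str for n in needles):
--             return col
--     return None
-- ===== Notes on version B (the rewrite author's own statement) =====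
-- stated objective: simpler
-- what changed: B precomputes one flattened needle list (all '/'-split parts of every pattern) and scans the columns in a single first-match pass, dropping A's provably redundant exact-match and whole-pattern passes (any exact or whole-pattern hit is subsumed by a split-part hit).
import Mathlib
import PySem

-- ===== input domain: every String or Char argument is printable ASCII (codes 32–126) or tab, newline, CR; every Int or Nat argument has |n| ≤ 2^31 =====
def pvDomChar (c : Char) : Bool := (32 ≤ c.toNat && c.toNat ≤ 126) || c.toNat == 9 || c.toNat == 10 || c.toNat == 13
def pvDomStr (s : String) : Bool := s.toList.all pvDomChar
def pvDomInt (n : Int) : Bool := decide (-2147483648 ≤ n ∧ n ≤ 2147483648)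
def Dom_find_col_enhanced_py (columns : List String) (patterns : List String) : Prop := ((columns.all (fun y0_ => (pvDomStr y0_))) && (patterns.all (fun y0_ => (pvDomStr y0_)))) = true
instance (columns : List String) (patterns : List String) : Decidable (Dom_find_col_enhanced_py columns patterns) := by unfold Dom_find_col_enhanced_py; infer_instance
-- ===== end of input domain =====

-- B flattens all '/'-split pattern parts into one needle list and scans the columns once,
-- dropping A's (provably redundant) exact-match and whole-pattern passes; objective: simpler.

-- ===== PORT A =====
-- str(col).lower().replace('\n', ' ').replace('\r', ' ').strip()
def pyNormCol (col : String) : String :=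
  PySem.Str.strip (PySem.Str.replace (PySem.Str.replace (PySem.Str.lower col) "\n" " ") "\r" " ")

-- pattern.split('/') — the separator is the nonempty literal "/", so split? is always `some`
def pySplitSlash (p : String) : List String :=
  (PySem.Str.split? p "/").getD []

def find_col_enhanced_py (columns : List String) (patterns : List String) : Option String :=
  match columns with
  | [] => none
  | col :: rest =>
    let col_str := pyNormCol col
    -- exact match first
    if patterns.contains col_str then some col
    -- partial matches
    else if patterns.any (fun pattern => PySem.Str.isIn pattern col_str) then some col
    -- pattern variations (split headers)
    else if patterns.any (fun pattern =>
        (pySplitSlash pattern).any (fun part => PySem.Str.isIn part col_str)) then some col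
    else find_col_enhanced_py rest patterns

-- ===== PORT B =====
def find_col_enhanced_py_alt (columns : List String) (patterns : List String) : Option String :=
  let needles := patterns.foldl (fun acc pattern => acc ++ pySplitSlash pattern) []
  columns.find? (fun col => needles.any (fun n => PySem.Str.isIn n (pyNormCol col)))

-- ===== PRECONDITION & SPEC =====
def Spec_find_col_enhanced_py (columns : List String) (patterns : List String) (out : Option String) : Prop := out = find_col_enhanced_py_alt columns patterns
instance (columns : List String) (patterns : List String) (out : Option String) : Decidable (Spec_find_col_enhanced_py columns patterns out) := by unfold Spec_find_col_enhanced_py; infer_instance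

-- ===== CLAIM (what is proved, stated in full; the proofs are below) =====
def Claim_equal_find_col_enhanced_py : Prop := ∀ (columns : List String) (patterns : List String), Dom_find_col_enhanced_py columns patterns → Spec_find_col_enhanced_py columns patterns (find_col_enhanced_py columns patterns)

-- ===== LEMMAS AND PROOFS =====

-- Every piece emitted by the split loop is an infix of the original string
-- (invariant: the pending piece `cur.reverse ++ l` and all emitted pieces are infixes of s).
lemma splitOn_go_infix (sep : List Char) (fuel : Nat) :
    ∀ (l cur : List Char) (acc : List (List Char)) (s : List Char),
      (cur.reverse ++ l) <:+: s → (∀ x ∈ acc, x <:+: s) →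
      ∀ x ∈ PySem.Chars.splitOn.go sep fuel l cur acc, x <:+: s := by
  induction fuel with
  | zero =>
    intro l cur acc s h hacc x hx
    simp [PySem.Chars.splitOn.go] at hx
    rcases hx with hx | hx
    · exact hacc x hx
    · exact hx ▸ h
  | succ fuel ih =>
    intro l cur acc s h hacc x hx
    cases l with
    | nil =>
      simp [PySem.Chars.splitOn.go] at hx
      rcases hx with hx | hx
      · exact hacc x hx
      · subst hx
        exact ((List.prefix_append cur.reverse []).isInfix).trans h
    | cons c rest =>
      rw [PySem.Chars.splitOn.go] at hx
      by_cases hp : sep.isPrefixOf (c :: rest) = true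
      · simp only [hp, if_true] at hx
        refine ih _ _ _ s ?_ ?_ x hx
        · simp only [List.reverse_nil, List.nil_append]
          exact (((List.drop_suffix sep.length (c :: rest)).trans
            (List.suffix_append cur.reverse (c :: rest))).isInfix).trans h
        · intro y hy
          rcases List.mem_cons.mp hy with hy | hy
          · subst hy
            exact ((List.prefix_append cur.reverse (c :: rest)).isInfix).trans h
          · exact hacc y hy
      · simp only [hp] at hx
        refine ih _ _ _ s ?_ hacc x hx
        simpa using h

lemma splitOn_go_ne_nil (sep : List Char) (fuel : Nat) :
    ∀ (l cur : List Char) (acc : List (List Char)),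
      PySem.Chars.splitOn.go sep fuel l cur acc ≠ [] := by
  induction fuel with
  | zero => intro l cur acc; simp [PySem.Chars.splitOn.go]
  | succ fuel ih =>
    intro l cur acc
    cases l with
    | nil => simp [PySem.Chars.splitOn.go]
    | cons c rest =>
      rw [PySem.Chars.splitOn.go]
      by_cases hp : sep.isPrefixOf (c :: rest) = true
      · simp only [hp, if_true]; exact ih _ _ _
      · simp only [hp]; exact ih _ _ _

-- Some part of p.split('/') is an infix of p itself.
lemma split_exists_infix (p : List Char) :
    ∃ part ∈ PySem.Chars.splitOn p ['/'], part <:+: p := by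
  have hall := splitOn_go_infix ['/'] (p.length + 1) p [] [] p (by simp) (by simp)
  have hne := splitOn_go_ne_nil ['/'] (p.length + 1) p [] []
  unfold PySem.Chars.splitOn
  cases hres : PySem.Chars.splitOn.go ['/'] (p.length + 1) p [] [] with
  | nil => exact absurd hres hne
  | cons y ys =>
    exact ⟨y, by simp, hall y (by rw [hres]; simp)⟩

lemma pySplitSlash_eq (p : String) :
    pySplitSlash p = (PySem.Chars.splitOn p.toList ['/']).map String.ofList := by
  simp [pySplitSlash, PySem.Str.split?, PySem.Chars.split?]

-- If the whole pattern occurs in col_str, so does some '/'-part of it.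
lemma isIn_split_of_isIn (p c : String) (h : PySem.Str.isIn p c = true) :
    (pySplitSlash p).any (fun part => PySem.Str.isIn part c) = true := by
  rw [pySplitSlash_eq]
  obtain ⟨part, hmem, hinf⟩ := split_exists_infix p.toList
  rw [List.any_map, List.any_eq_true]
  refine ⟨part, hmem, ?_⟩
  show PySem.Str.isIn (String.ofList part) c = true
  rw [PySem.Str.isIn_iff_infix, String.toList_ofList]
  exact hinf.trans ((PySem.Str.isIn_iff_infix p c).mp h)

-- Per-column: A's three tests, disjoined, equal B's single needles test.
lemma match_eq (patterns : List String) (c : String) :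
    ((patterns.contains c || patterns.any (fun pattern => PySem.Str.isIn pattern c))
      || patterns.any (fun pattern => (pySplitSlash pattern).any (fun part => PySem.Str.isIn part c)))
    = (patterns.foldl (fun acc pattern => acc ++ pySplitSlash pattern) []).any
        (fun n => PySem.Str.isIn n c) := by
  rw [PySem.List.foldl_append_eq_flatMap, List.nil_append, List.any_flatMap]
  -- the first two tests each imply the third, so the disjunction collapses to it
  cases h3 : patterns.any (fun pattern =>
      (pySplitSlash pattern).any (fun part => PySem.Str.isIn part c)) with
  | true => rw [Bool.or_true]
  | false =>
    have h2 : patterns.any (fun pattern => PySem.Str.isIn pattern c) = false := by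
      by_contra h2
      rw [Bool.not_eq_false, List.any_eq_true] at h2
      obtain ⟨p, hp, hin⟩ := h2
      rw [List.any_eq_false] at h3
      exact absurd (isIn_split_of_isIn p c hin) (by simpa using h3 p hp)
    have h1 : patterns.contains c = false := by
      by_contra h1
      rw [Bool.not_eq_false] at h1
      have hc : c ∈ patterns := List.mem_of_elem_eq_true h1
      have hin : PySem.Str.isIn c c = true :=
        (PySem.Str.isIn_iff_infix c c).mpr (List.infix_refl _)
      rw [List.any_eq_false] at h2
      exact absurd hin (h2 c hc)
    rw [h1, h2]
    simp

lemma main_eq (columns patterns : List String) :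
    find_col_enhanced_py columns patterns = find_col_enhanced_py_alt columns patterns := by
  induction columns with
  | nil => rfl
  | cons col rest ih =>
    rw [find_col_enhanced_py]
    unfold find_col_enhanced_py_alt
    rw [List.find?_cons]
    have hm := match_eq patterns (pyNormCol col)
    cases hB : (patterns.foldl (fun acc pattern => acc ++ pySplitSlash pattern) []).any
        (fun n => PySem.Str.isIn n (pyNormCol col)) with
    | true =>
      rw [hB] at hm
      show _ = some col
      split_ifs with h1 h2 h3
      · rfl
      · rfl
      · rfl
      · rw [Bool.not_eq_true] at h1 h2 h3
        rw [h1, h2, h3] at hm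
        simp at hm
    | false =>
      rw [hB] at hm
      rw [Bool.or_eq_false_iff, Bool.or_eq_false_iff] at hm
      obtain ⟨⟨h1, h2⟩, h3⟩ := hm
      rw [h1, h2, h3]
      simp only [Bool.false_eq_true, if_false]
      exact ih

-- ===== VERDICT (by name: the statement is the Claim_ definition above) =====
theorem find_col_enhanced_py_spec : Claim_equal_find_col_enhanced_py := by
  intro columns patterns _
  unfold Spec_find_col_enhanced_py
  exact main_eq columns patterns
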